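-- pv_equiv track=rewrite | github.com/bobllor/EntraBulker | backend/support/utils.py | format_hyphen_name
-- ===== SOURCE A (Python) =====
-- def format_hyphen_name(name: str) -> str:
--     '''Formats the name of the hyphen to extract the First and Last names only.'''
--     if "-" in name:
--         names: list[str] = name.split()
--         temp_name: list[str] = []
--
--         for i, n in enumerate(names):
--             # ignores any hyphens that arent the first or last names.
--             if "-" in n and (i == 0 or i == len(names) - 1):
--                 temp_n: list[str] = n.split("-")
--
--                 temp_name.append(temp_n[0 if len(temp_name) == 0 else -1])
--                 continue
--
--             # this handles if we have hyphens in the middle of names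
--             if i == 0 or i == len(names) - 1:
--                 temp_name.append(n)
--
--         name = " ".join(temp_name)
--
--     return name
-- ===== SOURCE B (Python) =====
-- def format_hyphen_name(name: str) -> str:
--     '''Formats the name of the hyphen to extract the First and Last names only.'''
--     if "-" not in name:
--         return name
--     words = name.split()
--     first = words[0].split("-")[0] if "-" in words[0] else words[0]
--     if len(words) == 1:
--         return first
--     last = words[-1].split("-")[-1] if "-" in words[-1] else words[-1]
--     return first + " " + last
-- ===== Notes on version B (the rewrite author's own statement) =====
-- stated objective: simpler
-- what changed: Replaces A's enumerate-and-filter accumulator loop over all words with direct closed-form indexing of the only two positions A ever keeps (words[0] and words[-1]), plus an early return for the hyphen-free and single-word cases.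
import Mathlib
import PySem

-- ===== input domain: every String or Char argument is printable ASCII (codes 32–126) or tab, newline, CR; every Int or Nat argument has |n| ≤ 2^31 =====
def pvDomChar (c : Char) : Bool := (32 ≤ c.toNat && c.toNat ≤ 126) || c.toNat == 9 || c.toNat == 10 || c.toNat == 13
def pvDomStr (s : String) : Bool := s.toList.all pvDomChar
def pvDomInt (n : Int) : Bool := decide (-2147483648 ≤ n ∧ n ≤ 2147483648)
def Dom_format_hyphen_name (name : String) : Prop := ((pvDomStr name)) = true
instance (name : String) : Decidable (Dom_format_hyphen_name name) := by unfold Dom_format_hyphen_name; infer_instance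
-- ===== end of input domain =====

-- B replaces A's enumerate-and-filter loop by direct indexing of words[0] and words[-1] (objective: simpler).

-- ===== PORT A =====
-- the body of A's for-loop, as a helper (L = len(names))
-- temp_n is never [] (str.split('-') always yields ≥ 1 piece) and "-" ≠ "", so .getD is exact: Python raises nowhere here.
def pvStepA (L : Int) (temp_name : List String) (p : Int × String) : List String :=
  if PySem.Str.isIn "-" p.2 && (p.1 == 0 || p.1 == L - 1) then
    let temp_n : List String := (PySem.Str.split? p.2 "-").getD []
    temp_name ++ [(PySem.List.pyGet? temp_n (if temp_name.length = 0 then 0 else -1)).getD ""]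
  else if p.1 == 0 || p.1 == L - 1 then
    temp_name ++ [p.2]
  else temp_name

def format_hyphen_name (name : String) : String :=
  if PySem.Str.isIn "-" name then
    let names : List String := PySem.Str.split₀ name
    let temp_name : List String :=
      (PySem.List.enumerate names).foldl (pvStepA (names.length : Int)) []
    PySem.Str.join " " temp_name
  else name

-- ===== PORT B =====
-- words is never [] when "-" is in name, and split? lists are never [], so the .getD/.headD/.getLastD defaults are exact.
def format_hyphen_name_alt (name : String) : String :=
  if !(PySem.Str.isIn "-" name) then name
  else
    let words : List String := PySem.Str.split₀ name
    let w0 : String := (PySem.List.pyGet? words 0).getD ""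
    let first : String :=
      if PySem.Str.isIn "-" w0 then ((PySem.Str.split? w0 "-").getD []).headD "" else w0
    if words.length == 1 then first
    else
      let wl : String := (PySem.List.pyGet? words (-1)).getD ""
      let last : String :=
        if PySem.Str.isIn "-" wl then ((PySem.Str.split? wl "-").getD []).getLastD "" else wl
      first ++ " " ++ last

-- ===== PRECONDITION & SPEC =====
def Spec_format_hyphen_name (name : String) (out : String) : Prop := out = format_hyphen_name_alt name
instance (name : String) (out : String) : Decidable (Spec_format_hyphen_name name out) := by unfold Spec_format_hyphen_name; infer_instance

-- ===== CLAIM (what is proved, stated in full; the proofs are below) =====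
def Claim_equal_format_hyphen_name : Prop := ∀ (name : String), Dom_format_hyphen_name name → Spec_format_hyphen_name name (format_hyphen_name name)

-- ===== LEMMAS AND PROOFS =====

-- split₀.go yields a nonempty result when the accumulator, current word, or remaining input is productive
lemma split0_go_ne_nil : ∀ (s : List Char) (cur : List Char) (acc : List (List Char)),
    (acc ≠ [] ∨ cur ≠ [] ∨ ∃ c ∈ s, PySem.Chars.isspace c = false) →
    PySem.Chars.split₀.go s cur acc ≠ [] := by
  intro s
  induction s with
  | nil =>
    intro cur acc h
    simp only [PySem.Chars.split₀.go]
    rcases h with h | h | ⟨c, hc, _⟩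
    · split <;> simp_all
    · split <;> simp_all
    · simp at hc
  | cons c rest ih =>
    intro cur acc h
    simp only [PySem.Chars.split₀.go]
    by_cases hc : PySem.Chars.isspace c = true
    · simp only [hc, if_true]
      by_cases hcur : cur.isEmpty = true
      · simp only [hcur, if_true]
        apply ih
        rcases h with h | h | ⟨d, hd, hds⟩
        · exact Or.inl h
        · exact absurd (List.isEmpty_iff.mp hcur) h
        · rcases List.mem_cons.mp hd with rfl | hd
          · simp [hc] at hds
          · exact Or.inr (Or.inr ⟨d, hd, hds⟩)
      · simp only [hcur]
        exact ih _ _ (Or.inl (by simp))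
    · simp only [hc]
      exact ih _ _ (Or.inr (Or.inl (by simp)))

lemma split0_ne_nil_of_hyphen (name : String) (h : PySem.Str.isIn "-" name = true) :
    PySem.Str.split₀ name ≠ [] := by
  have hinf : ("-" : String).toList <:+: name.toList :=
    (PySem.Str.isIn_iff_infix _ _).mp h
  have hmem : '-' ∈ name.toList := by
    rcases hinf with ⟨p, q, hpq⟩
    rw [← hpq]
    have : '-' ∈ ("-" : String).toList := by decide
    simp [List.mem_append]
  simp only [PySem.Str.split₀, PySem.Chars.split₀]
  intro hnil
  have := split0_go_ne_nil name.toList [] []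
    (Or.inr (Or.inr ⟨'-', hmem, by decide⟩))
  simp [List.map_eq_nil_iff] at hnil
  exact this hnil

-- the middle of A's loop (indices strictly between 0 and L-1) leaves the accumulator unchanged
lemma foldA_mid (L : Int) : ∀ (mid : List String) (s : Int) (temp : List String),
    1 ≤ s → s + mid.length ≤ L - 1 →
    (PySem.List.enumerate mid s).foldl (pvStepA L) temp = temp := by
  intro mid
  induction mid with
  | nil => intro s temp _ _; simp [PySem.List.enumerate]
  | cons x xs ih =>
    intro s temp h1 h2
    rw [PySem.List.enumerate_cons]
    simp only [List.foldl_cons]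
    have hs0 : (s == (0 : Int)) = false := by simp; omega
    have hsL : (s == L - 1) = false := by simp at h2 ⊢; omega
    have hstep : pvStepA L temp (s, x) = temp := by
      simp only [pvStepA, hs0, hsL]
      simp
    rw [hstep]
    apply ih
    · omega
    · simp at h2 ⊢; omega

lemma pyGet0_getD {α : Type} (l : List α) (d : α) :
    (PySem.List.pyGet? l 0).getD d = l.headD d := by
  cases l <;> simp [PySem.List.pyGet?, PySem.List.pyIdx?]

lemma pyGetNeg1_getD {α : Type} (l : List α) (d : α) :
    (PySem.List.pyGet? l (-1)).getD d = l.getLastD d := by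
  cases l with
  | nil => simp [PySem.List.pyGet?, PySem.List.pyIdx?]
  | cons x xs =>
    simp only [PySem.List.pyGet?, PySem.List.pyIdx?]
    have hn : ¬ ((0:Int) ≤ -1) := by omega
    have h2 : -(((x :: xs).length : Nat) : Int) ≤ -1 := by
      simp only [List.length_cons]; push_cast; omega
    rw [if_neg hn, if_pos h2]
    simp [List.getLastD_eq_getLast?, List.getLast?_eq_getElem?]

-- what A's first step produces, and what its last step produces
lemma stepA_first (L : Int) (a : String) :
    pvStepA L [] (0, a) =
      [if PySem.Str.isIn "-" a = true then ((PySem.Str.split? a "-").getD []).headD "" else a] := by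
  simp only [pvStepA]
  have hc : (((0:Int) == 0 || (0:Int) == L - 1)) = true := by simp
  rw [hc, Bool.and_true]
  cases h : PySem.Str.isIn "-" a
  · simp
  · simp [pyGet0_getD]

lemma stepA_last (L : Int) (b first : String) :
    pvStepA L [first] (L - 1, b) =
      [first, if PySem.Str.isIn "-" b = true then ((PySem.Str.split? b "-").getD []).getLastD "" else b] := by
  simp only [pvStepA]
  have hc : ((L - 1 == (0:Int) || L - 1 == L - 1)) = true := by simp
  rw [hc, Bool.and_true]
  cases h : PySem.Str.isIn "-" b
  · simp
  · simp [pyGetNeg1_getD]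

lemma join_single (x : String) : PySem.Str.join " " [x] = x := by
  apply String.toList_injective
  simp only [PySem.Str.join, List.map_cons, List.map_nil, PySem.Chars.join_singleton]
  simp

lemma join_pair (x y : String) : PySem.Str.join " " [x, y] = x ++ " " ++ y := by
  apply String.toList_injective
  simp only [PySem.Str.join, List.map_cons, List.map_nil, PySem.Chars.join_cons_cons,
    PySem.Chars.join_singleton]
  simp

-- ===== VERDICT (by name: the statement is the Claim_ definition above) =====
theorem format_hyphen_name_spec : Claim_equal_format_hyphen_name := by
  intro name _
  unfold Spec_format_hyphen_name format_hyphen_name format_hyphen_name_alt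
  cases h : PySem.Str.isIn "-" name with
  | false => simp only [Bool.not_false, if_true, Bool.false_eq_true, if_false]
  | true =>
  simp only [Bool.not_true, if_true, Bool.false_eq_true, if_false]
  have hne := split0_ne_nil_of_hyphen name h
  obtain ⟨a, t, hat⟩ := List.exists_cons_of_ne_nil hne
  rcases t.eq_nil_or_concat with rfl | ⟨mid, b, rfl⟩

  · -- single word
    rw [hat]
    rw [show PySem.List.enumerate [a] 0 = [((0:Int), a)] from by
      rw [PySem.List.enumerate_cons, PySem.List.enumerate_nil]]
    simp only [List.foldl_cons, List.foldl_nil, List.length_cons, List.length_nil]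
    rw [stepA_first, join_single]
    rw [show (PySem.List.pyGet? [a] 0).getD "" = a from by rw [pyGet0_getD]; rfl]
    rfl
  · -- first word a, middle mid, last word b
    simp only [List.concat_eq_append] at hat
    rw [hat]
    have hL : (((a :: (mid ++ [b])).length : Nat) : Int) = (mid.length : Int) + 2 := by
      simp; omega
    rw [PySem.List.enumerate_cons, PySem.List.enumerate_append]
    simp only [List.foldl_cons, List.foldl_append]
    rw [hL, stepA_first]
    simp only [zero_add]
    rw [foldA_mid _ mid 1 _ (by omega) (by omega)]
    rw [show PySem.List.enumerate [b] (1 + (mid.length : Int)) = [((1 + (mid.length : Int)), b)] from by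
      rw [PySem.List.enumerate_cons, PySem.List.enumerate_nil]]
    simp only [List.foldl_cons, List.foldl_nil]
    rw [show (1 + (mid.length : Int)) = ((mid.length : Int) + 2) - 1 from by omega]
    rw [stepA_last]
    rw [join_pair]
    have hlen : (((a :: (mid ++ [b])).length : Nat) == 1) = false := by simp
    rw [hlen]
    simp only [Bool.false_eq_true, if_false]
    have hw0 : (PySem.List.pyGet? (a :: (mid ++ [b])) 0).getD "" = a := by
      rw [pyGet0_getD]; rfl
    have hwl : (PySem.List.pyGet? (a :: (mid ++ [b])) (-1)).getD "" = b := by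
      rw [pyGetNeg1_getD, List.getLastD_cons, List.getLastD_concat]
    rw [hw0, hwl]
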